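-- pv_equiv track=rewrite | github.com/sgarcia-upc/XACO-TFTP | ex4/lib/tftp_pkg.py | decodificate_oack
-- ===== SOURCE A (Python) =====
-- def decodificate_oack(pkg):
--     last = 2
--     option_list = []
--     option = ""
--
--     for byte in pkg[last:]:
--         last += 1
--         if (byte == 0):
--             option_list.append(option)
--             option = ""
--         else:
--             option += chr(byte)
--
--     return option_list
-- ===== SOURCE B (Python) =====
-- def decodificate_oack(pkg):
--     s = "".join(map(chr, pkg[2:]))
--     return s.split("\x00")[:-1]
-- ===== Notes on version B (the rewrite author's own statement) =====
-- stated objective: idiomatic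
-- what changed: Replaces A's char-by-char accumulator loop (building each option and flushing on null) with a single library split on the null byte followed by dropping the unterminated last part.
-- outside the precondition, e.g. on decodificate_oack([0, 6, 0, 55296]): A returns [''], B returns ['']
import Mathlib
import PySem

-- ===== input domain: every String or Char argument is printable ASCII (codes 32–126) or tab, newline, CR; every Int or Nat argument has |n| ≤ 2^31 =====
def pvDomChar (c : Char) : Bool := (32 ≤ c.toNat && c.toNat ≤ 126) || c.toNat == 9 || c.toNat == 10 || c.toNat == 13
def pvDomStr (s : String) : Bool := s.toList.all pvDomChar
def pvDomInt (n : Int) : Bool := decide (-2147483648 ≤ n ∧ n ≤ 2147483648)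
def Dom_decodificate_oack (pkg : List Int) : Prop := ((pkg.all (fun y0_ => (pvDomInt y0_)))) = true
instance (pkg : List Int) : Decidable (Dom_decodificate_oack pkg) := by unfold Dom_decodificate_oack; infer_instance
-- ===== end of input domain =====

-- B tokenizes the tail by splitting on the null byte in one library pass and drops the
-- unterminated last part, instead of A's char-by-char accumulator loop (objective: idiomatic).


-- ===== PORT A =====
-- chr(byte) is ported as Char.ofNat byte.toNat; the Python string `option` built by += is kept
-- as a List Char and packed with String.mk when appended — exact for bytes admitted by Pre_.
def decodificate_oack (pkg : List Int) : List String :=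
  let r := (PySem.List.slice pkg (some 2) none).foldl
    (fun (s : Int × List String × List Char) byte =>
      let last := s.1 + 1
      if byte == 0 then (last, s.2.1 ++ [String.mk s.2.2], ([] : List Char))
      else (last, s.2.1, s.2.2 ++ [Char.ofNat byte.toNat]))
    (2, [], [])
  r.2.1

-- ===== PORT B =====
-- ''.join(map(chr, pkg[2:])) : the List Char `s`; str.split on the single char '\x00' is
-- List.splitOn (same N+1-parts semantics); [:-1] is PySem.List.slice … (some (-1)).
def decodificate_oack_alt (pkg : List Int) : List String :=
  let s := (PySem.List.slice pkg (some 2) none).map (fun b => Char.ofNat b.toNat)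
  (PySem.List.slice (s.splitOn (Char.ofNat 0)) none (some (-1))).map (fun cs => String.mk cs)

-- ===== PRECONDITION & SPEC =====
-- Pre_ excludes tail bytes on which Python's chr raises (negative or > 0x10FFFF) and, although
-- A returns there, the surrogate range 0xD800–0xDFFF, which Lean's Char/String cannot represent.
def Pre_decodificate_oack (pkg : List Int) : Prop :=
  ∀ b ∈ pkg.drop 2, 0 ≤ b ∧ b ≤ 1114111 ∧ (b < 55296 ∨ 57344 ≤ b)
instance (pkg : List Int) : Decidable (Pre_decodificate_oack pkg) := by
  unfold Pre_decodificate_oack; infer_instance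
def pvWitness_decodificate_oack : List Int := [0, 6, 112, 113, 0, 114, 0, 115]
def Spec_decodificate_oack (pkg : List Int) (out : List String) : Prop := out = decodificate_oack_alt pkg
instance (pkg : List Int) (out : List String) : Decidable (Spec_decodificate_oack pkg out) := by unfold Spec_decodificate_oack; infer_instance

-- ===== CLAIM (what is proved, stated in full; the proofs are below) =====
def Claim_equal_decodificate_oack : Prop := ∀ (pkg : List Int), Dom_decodificate_oack pkg → Pre_decodificate_oack pkg → Spec_decodificate_oack pkg (decodificate_oack pkg)

-- ===== LEMMAS AND PROOFS =====

-- For bytes admitted by Pre_, Char.ofNat b.toNat is the null char exactly when b = 0.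
lemma chr_eq_nul_iff (b : Int) (hb : 0 ≤ b ∧ b ≤ 1114111 ∧ (b < 55296 ∨ 57344 ≤ b)) :
    Char.ofNat b.toNat = Char.ofNat 0 ↔ b = 0 := by
  constructor
  · intro h
    have hv : Nat.isValidChar b.toNat := by
      rcases hb.2.2 with h1 | h1
      · exact Or.inl (by omega)
      · exact Or.inr ⟨by omega, by omega⟩
    have := congrArg Char.toNat h
    rw [Char.toNat_ofNat, Char.toNat_ofNat, if_pos hv] at this
    simp only [if_pos (show Nat.isValidChar 0 from Or.inl (by norm_num))] at this
    omega
  · intro h; subst h; rfl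

-- Loop invariant: A's accumulator loop equals splitting the remaining chars on nul and
-- dropping the unterminated tail, prefixed by the options already emitted.
-- (The step function is written beta/zeta-reduced; it is definitionally A's loop body.)
lemma loop_eq_split (l : List Int) (hl : ∀ b ∈ l, 0 ≤ b ∧ b ≤ 1114111 ∧ (b < 55296 ∨ 57344 ≤ b))
    (acc : List String) (cur : List Char) (hcur : Char.ofNat 0 ∉ cur) (n : Int) :
    (l.foldl (fun (s : Int × List String × List Char) (byte : Int) =>
        if byte == 0 then (s.1 + 1, s.2.1 ++ [String.mk s.2.2], ([] : List Char))
        else (s.1 + 1, s.2.1, s.2.2 ++ [Char.ofNat byte.toNat])) (n, acc, cur)).2.1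
      = acc ++ (((cur ++ l.map (fun b => Char.ofNat b.toNat)).splitOn (Char.ofNat 0)).dropLast).map
          (fun cs => String.mk cs) := by
  induction l generalizing acc cur n with
  | nil =>
    have hs : cur.splitOnP (fun x => x == Char.ofNat 0) = [cur] :=
      List.splitOnP_eq_single (xs := cur) (p := fun x => x == Char.ofNat 0)
        (fun x hx => by simp only [beq_iff_eq]; exact fun h => hcur (h ▸ hx))
    simp only [List.foldl_nil, List.map_nil, List.append_nil, List.splitOn, hs]
    simp
  | cons b t ih =>
    have hb := hl b (List.mem_cons_self ..)
    have ht : ∀ x ∈ t, 0 ≤ x ∧ x ≤ 1114111 ∧ (x < 55296 ∨ 57344 ≤ x) :=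
      fun x hx => hl x (List.mem_cons_of_mem _ hx)
    rw [List.foldl_cons]
    by_cases hb0 : b = 0
    · subst hb0
      rw [if_pos (by decide), ih ht (acc ++ [String.mk cur]) [] (by simp) (n + 1)]
      have hsplit : (cur ++ (0 :: t).map (fun b => Char.ofNat b.toNat)).splitOn (Char.ofNat 0)
          = cur :: (t.map (fun b => Char.ofNat b.toNat)).splitOn (Char.ofNat 0) := by
        simp only [List.map_cons, Int.toNat_zero, List.splitOn]
        exact List.splitOnP_first (xs := cur) (p := fun x => x == Char.ofNat 0)
          (fun x hx => by simp only [beq_iff_eq]; exact fun h => hcur (h ▸ hx))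
          (Char.ofNat 0) (by simp) _
      have hne : (t.map (fun b => Char.ofNat b.toNat)).splitOn (Char.ofNat 0) ≠ [] :=
        List.splitOnP_ne_nil _ _
      rw [hsplit, List.dropLast_cons_of_ne_nil hne]
      simp
    · have hcur' : Char.ofNat 0 ∉ cur ++ [Char.ofNat b.toNat] := by
        intro h
        rcases List.mem_append.1 h with h | h
        · exact hcur h
        · simp only [List.mem_singleton] at h
          exact hb0 ((chr_eq_nul_iff b hb).1 h.symm)
      rw [if_neg (by simpa using hb0), ih ht acc (cur ++ [Char.ofNat b.toNat]) hcur' (n + 1)]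
      simp

-- ===== VERDICT (by name: the statement is the Claim_ definition above) =====
theorem decodificate_oack_spec : Claim_equal_decodificate_oack := by
  intro pkg _ hpre
  unfold Spec_decodificate_oack decodificate_oack decodificate_oack_alt
  rw [PySem.List.slice_from pkg (a := 2) (by norm_num)]
  exact (loop_eq_split (pkg.drop (2:Int).toNat) (by simpa using hpre) [] [] (by simp) 2).trans
    (by simp only [PySem.List.slice_to_neg_one]; simp)
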